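-- pv_equiv track=rewrite | github.com/dfjmsf/Agent | core/playbook_loader.py | _has_frontend_tech
-- ===== SOURCE A (Python) =====
-- from typing import List, Optional
--
-- def _has_frontend_tech(tech_stack: List[str]) -> bool:
--     """判断 tech_stack 中是否包含前端技术"""
--     frontend_keywords = {
--         "html", "css", "javascript", "js", "vue", "react", "angular",
--         "svelte", "frontend", "前端", "vanilla", "typescript", "ts"
--     }
--     for tech in tech_stack:
--         for kw in frontend_keywords:
--             if kw in tech.lower():
--                 return True
--     return False
-- ===== SOURCE B (Python) =====
-- def _has_frontend_tech(tech_stack):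
--     """判断 tech_stack 中是否包含前端技术"""
--     frontend_keywords = [
--         "html", "css", "javascript", "js", "vue", "react", "angular",
--         "svelte", "frontend", "前端", "vanilla", "typescript", "ts"
--     ]
--     # multi-pattern NFA scan: walk each lowered tech left to right once,
--     # maintaining the set of keyword suffixes still pending; a match is found
--     # when some pending suffix is fully consumed.  No substring primitive used.
--     for tech in tech_stack:
--         active = []
--         for c in tech.lower():
--             nxt = []
--             for kw in active + frontend_keywords:
--                 if kw and kw[0] == c:
--                     nxt.append(kw[1:])
--             if "" in nxt:
--                 return True
--             active = nxt
--     return False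
-- ===== Notes on version B (the rewrite author's own statement) =====
-- stated objective: alternative
-- what changed: Instead of testing each keyword for substring containment in each tech, B runs a multi-pattern automaton scan: each lowered tech is traversed character by character once while maintaining the list of still-viable keyword suffixes (partial matches started at earlier positions), reporting a match when a suffix is fully consumed, with no substring primitive at all.
import Mathlib
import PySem

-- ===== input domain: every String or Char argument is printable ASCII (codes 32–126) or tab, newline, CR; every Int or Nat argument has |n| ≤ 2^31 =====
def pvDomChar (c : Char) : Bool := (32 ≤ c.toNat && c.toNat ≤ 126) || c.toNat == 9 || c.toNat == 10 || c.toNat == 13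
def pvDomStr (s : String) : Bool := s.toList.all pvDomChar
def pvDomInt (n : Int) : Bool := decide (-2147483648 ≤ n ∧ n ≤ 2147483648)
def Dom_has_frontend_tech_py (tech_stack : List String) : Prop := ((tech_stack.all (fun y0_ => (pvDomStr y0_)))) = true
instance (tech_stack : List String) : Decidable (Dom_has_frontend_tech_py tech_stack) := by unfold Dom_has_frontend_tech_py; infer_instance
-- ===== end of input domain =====

-- B replaces the per-keyword substring tests with a single left-to-right
-- multi-pattern automaton scan per tech that maintains the pending keyword
-- suffixes (objective: alternative algorithm, similar cost).

-- the frontend keyword set; iteration order does not affect the boolean result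
def pvFrontendKeywords : List String :=
  ["html", "css", "javascript", "js", "vue", "react", "angular",
   "svelte", "frontend", "前端", "vanilla", "typescript", "ts"]

-- ===== PORT A =====
-- for tech in tech_stack: for kw in frontend_keywords: if kw in tech.lower(): return True / return False
def has_frontend_tech_py (tech_stack : List String) : Bool :=
  tech_stack.any (fun tech =>
    pvFrontendKeywords.any (fun kw => PySem.Str.isIn kw (PySem.Str.lower tech)))

-- ===== PORT B =====
-- the keywords as character lists
def pvKw : List (List Char) := pvFrontendKeywords.map (fun kw => kw.toList)

-- nxt = [kw[1:] for kw in active + frontend_keywords if kw and kw[0] == c]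
def pvStepB (c : Char) (active : List (List Char)) : List (List Char) :=
  (active ++ pvKw).filterMap (fun kw =>
    match kw with
    | [] => none
    | h :: t => if h = c then some t else none)

-- for c in tech.lower(): nxt = step; if "" in nxt: return True; active = nxt / (end) false
def pvScanB (active : List (List Char)) : List Char → Bool
  | [] => false
  | c :: rest =>
      let nxt := pvStepB c active
      if ([] : List Char) ∈ nxt then true else pvScanB nxt rest

def has_frontend_tech_py_alt (tech_stack : List String) : Bool :=
  tech_stack.any (fun tech => pvScanB [] (PySem.Str.lower tech).toList)

-- ===== PRECONDITION & SPEC =====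
def Spec_has_frontend_tech_py (tech_stack : List String) (out : Bool) : Prop := out = has_frontend_tech_py_alt tech_stack
instance (tech_stack : List String) (out : Bool) : Decidable (Spec_has_frontend_tech_py tech_stack out) := by unfold Spec_has_frontend_tech_py; infer_instance

-- ===== CLAIM =====
def Claim_equal_has_frontend_tech_py : Prop := ∀ (tech_stack : List String), Dom_has_frontend_tech_py tech_stack → Spec_has_frontend_tech_py tech_stack (has_frontend_tech_py tech_stack)

-- ===== LEMMAS AND PROOFS =====

lemma pvKw_ne_nil : ∀ kw ∈ pvKw, kw ≠ [] := by decide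

lemma pv_mem_step {x : List Char} {c : Char} {active : List (List Char)} :
    x ∈ pvStepB c active ↔ (c :: x) ∈ active ++ pvKw := by
  simp only [pvStepB, List.mem_filterMap]
  constructor
  · rintro ⟨kw, hkw, hf⟩
    match kw with
    | [] => simp at hf
    | h :: t =>
      by_cases hc : h = c
      · simp [hc] at hf; subst hf; subst hc; exact hkw
      · simp [hc] at hf
  · intro h
    exact ⟨c :: x, h, by simp⟩

lemma pv_scan_iff : ∀ (s : List Char) (active : List (List Char)),
    pvScanB active s = true ↔
      ((∃ a ∈ active, a ≠ [] ∧ a <+: s) ∨ (∃ kw ∈ pvKw, kw <:+: s)) := by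
  intro s
  induction s with
  | nil =>
    intro active
    simp only [pvScanB]
    constructor
    · intro h; exact absurd h (by simp)
    · rintro (⟨a, _, hne, hp⟩ | ⟨kw, hkw, hinf⟩)
      · exact absurd (List.eq_nil_of_prefix_nil hp) hne
      · exact absurd (List.eq_nil_of_infix_nil hinf) (pvKw_ne_nil kw hkw)
  | cons c rest ih =>
    intro active
    simp only [pvScanB]
    by_cases h0 : ([] : List Char) ∈ pvStepB c active
    · simp only [h0, if_pos]
      constructor
      · intro _
        rcases List.mem_append.mp (pv_mem_step.mp h0) with h | h
        · exact Or.inl ⟨[c], h, by simp, by simp⟩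
        · exact Or.inr ⟨[c], h, List.IsPrefix.isInfix (by simp)⟩
      · intro _; trivial
    · simp only [h0, if_neg, not_false_iff]
      rw [ih (pvStepB c active)]
      constructor
      · rintro (⟨a, ha, hne, hp⟩ | ⟨kw, hkw, hinf⟩)
        · rcases List.mem_append.mp (pv_mem_step.mp ha) with h | h
          · exact Or.inl ⟨c :: a, h, by simp, by simpa [List.cons_prefix_cons] using hp⟩
          · exact Or.inr ⟨c :: a, h, List.infix_cons_iff.mpr
              (Or.inl (by simpa [List.cons_prefix_cons] using hp))⟩
        · exact Or.inr ⟨kw, hkw, List.infix_cons_iff.mpr (Or.inr hinf)⟩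
      · rintro (⟨a, ha, hne, hp⟩ | ⟨kw, hkw, hinf⟩)
        · obtain ⟨h, t, rfl⟩ := List.exists_cons_of_ne_nil hne
          rw [List.cons_prefix_cons] at hp
          obtain ⟨hc, hp⟩ := hp
          have ht : t ∈ pvStepB c active :=
            pv_mem_step.mpr (List.mem_append.mpr (Or.inl (hc ▸ ha)))
          have htne : t ≠ [] := fun h => h0 (h ▸ ht)
          exact Or.inl ⟨t, ht, htne, hp⟩
        · rcases List.infix_cons_iff.mp hinf with hpre | hinf'
          · obtain ⟨h, t, hkweq⟩ := List.exists_cons_of_ne_nil (pvKw_ne_nil kw hkw)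
            subst hkweq
            rw [List.cons_prefix_cons] at hpre
            obtain ⟨hc, hpre⟩ := hpre
            have ht : t ∈ pvStepB c active :=
              pv_mem_step.mpr (List.mem_append.mpr (Or.inr (hc ▸ hkw)))
            have htne : t ≠ [] := fun h => h0 (h ▸ ht)
            exact Or.inl ⟨t, ht, htne, hpre⟩
          · exact Or.inr ⟨kw, hkw, hinf'⟩

lemma pv_main (tech_stack : List String) :
    has_frontend_tech_py tech_stack = has_frontend_tech_py_alt tech_stack := by
  rw [Bool.eq_iff_iff]
  simp only [has_frontend_tech_py, has_frontend_tech_py_alt, List.any_eq_true,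
    PySem.Str.isIn_iff_infix, PySem.Str.toList_lower]
  constructor
  · rintro ⟨tech, ht, kw, hkw, hinf⟩
    refine ⟨tech, ht, ?_⟩
    rw [pv_scan_iff]
    exact Or.inr ⟨kw.toList, List.mem_map.mpr ⟨kw, hkw, rfl⟩, hinf⟩
  · rintro ⟨tech, ht, hscan⟩
    rw [pv_scan_iff] at hscan
    rcases hscan with ⟨a, ha, _, _⟩ | ⟨kw, hkw, hinf⟩
    · cases ha
    · obtain ⟨kw', hkw', rfl⟩ := List.mem_map.mp hkw
      exact ⟨tech, ht, kw', hkw', hinf⟩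

-- ===== VERDICT =====
theorem has_frontend_tech_py_spec : Claim_equal_has_frontend_tech_py := by
  intro tech_stack _
  unfold Spec_has_frontend_tech_py
  exact pv_main tech_stack
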